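-- pv_equiv track=rewrite | github.com/Yepavlov/Python_pro_class | HW_05/hw_with_flask/utils/return_cities_by_genre.py | return_cities_by_genre
-- ===== SOURCE A (Python) =====
-- from typing import List
--
-- def return_cities_by_genre(data: List[tuple]) -> List[tuple]:
--     result_list = []
--     init_value = 1
--     for el in data:
--         if el[1] >= init_value:
--             init_value = el[1]
--             result_list.append(el)
--     return result_list
-- ===== SOURCE B (Python) =====
-- def return_cities_by_genre(data):
--     # Two-pass: precompute the prefix-maximum threshold (seeded at 1) for
--     # each position, then filter by comparing each element to its threshold.
--     thresholds = []
--     m = 1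
--     for el in data:
--         thresholds.append(m)
--         if el[1] > m:
--             m = el[1]
--     return [el for el, t in zip(data, thresholds) if el[1] >= t]
-- ===== Notes on version B (the rewrite author's own statement) =====
-- stated objective: alternative
-- what changed: Replaces A's single fused stateful filter (threshold updated while appending) with a two-pass scheme: first a prefix-maximum threshold table seeded at 1, then a stateless zip-and-filter pass.
import Mathlib
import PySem

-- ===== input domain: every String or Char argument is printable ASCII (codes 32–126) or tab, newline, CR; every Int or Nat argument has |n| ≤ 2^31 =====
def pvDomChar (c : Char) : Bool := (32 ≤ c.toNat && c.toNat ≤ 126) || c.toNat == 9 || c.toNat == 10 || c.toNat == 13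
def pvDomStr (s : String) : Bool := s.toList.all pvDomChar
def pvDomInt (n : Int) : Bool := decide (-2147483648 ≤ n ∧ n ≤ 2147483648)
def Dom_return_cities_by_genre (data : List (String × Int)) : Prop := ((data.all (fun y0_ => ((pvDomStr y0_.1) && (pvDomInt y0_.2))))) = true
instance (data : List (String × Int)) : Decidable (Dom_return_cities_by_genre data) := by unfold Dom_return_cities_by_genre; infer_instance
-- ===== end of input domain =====

-- B replaces A's fused stateful filter with a prefix-maximum threshold table
-- followed by a stateless zip-and-filter pass (objective: alternative).

-- ===== PORT A =====
-- one fused pass: state = (result_list, init_value)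
def return_cities_by_genre (data : List (String × Int)) : List (String × Int) :=
  (data.foldl (fun (st : List (String × Int) × Int) el =>
      if el.2 ≥ st.2 then (st.1 ++ [el], el.2) else st)
    ([], 1)).1

-- ===== PORT B =====
-- pass 1: prefix-maximum threshold table, state = (thresholds, m)
def rcbg_thresholds (data : List (String × Int)) : List Int :=
  (data.foldl (fun (st : List Int × Int) el =>
      (st.1 ++ [st.2], if el.2 > st.2 then el.2 else st.2))
    ([], 1)).1

-- pass 2: stateless zip-and-filter
def return_cities_by_genre_alt (data : List (String × Int)) : List (String × Int) :=
  ((data.zip (rcbg_thresholds data)).filter (fun p => p.1.2 ≥ p.2)).map (·.1)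

-- ===== PRECONDITION & SPEC =====
def Spec_return_cities_by_genre (data : List (String × Int)) (out : List (String × Int)) : Prop := out = return_cities_by_genre_alt data
instance (data : List (String × Int)) (out : List (String × Int)) : Decidable (Spec_return_cities_by_genre data out) := by unfold Spec_return_cities_by_genre; infer_instance

-- ===== CLAIM (what is proved, stated in full; the proofs are below) =====
def Claim_equal_return_cities_by_genre : Prop := ∀ (data : List (String × Int)), Dom_return_cities_by_genre data → Spec_return_cities_by_genre data (return_cities_by_genre data)

-- ===== LEMMAS AND PROOFS =====

-- reference recursion: result of the scan starting with threshold m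
def rcbgGo (data : List (String × Int)) (m : Int) : List (String × Int) :=
  match data with
  | [] => []
  | el :: t => if el.2 ≥ m then el :: rcbgGo t el.2 else rcbgGo t m

-- reference threshold list starting with threshold m
def rcbgThs (data : List (String × Int)) (m : Int) : List Int :=
  match data with
  | [] => []
  | el :: t => m :: rcbgThs t (if el.2 > m then el.2 else m)

theorem rcbg_foldA (data : List (String × Int)) :
    ∀ (acc : List (String × Int)) (m : Int),
    (data.foldl (fun (st : List (String × Int) × Int) el =>
        if el.2 ≥ st.2 then (st.1 ++ [el], el.2) else st) (acc, m)).1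
      = acc ++ rcbgGo data m := by
  induction data with
  | nil => intro acc m; simp [rcbgGo]
  | cons el t ih =>
    intro acc m
    by_cases h : el.2 ≥ m
    · simp [List.foldl, rcbgGo, h, ih]
    · simp [List.foldl, rcbgGo, h, ih]

theorem rcbg_foldB (data : List (String × Int)) :
    ∀ (acc : List Int) (m : Int),
    (data.foldl (fun (st : List Int × Int) el =>
        (st.1 ++ [st.2], if el.2 > st.2 then el.2 else st.2)) (acc, m)).1
      = acc ++ rcbgThs data m := by
  induction data with
  | nil => intro acc m; simp [rcbgThs]
  | cons el t ih =>
    intro acc m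
    simp [List.foldl, rcbgThs, ih]

theorem rcbg_zip_filter (data : List (String × Int)) :
    ∀ (m : Int),
    ((data.zip (rcbgThs data m)).filter (fun p => p.1.2 ≥ p.2)).map (·.1)
      = rcbgGo data m := by
  induction data with
  | nil => intro m; simp [rcbgThs, rcbgGo]
  | cons el t ih =>
    intro m
    by_cases h : el.2 ≥ m
    · have h' : el.2 > m ∨ el.2 = m := lt_or_eq_of_le h |>.elim (fun h => Or.inl h) (fun h => Or.inr h.symm)
      rcases h' with h' | h'
      · simp [rcbgThs, rcbgGo, h, h', ih]
      · simp [rcbgThs, rcbgGo, h', ih]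
    · have h' : ¬ el.2 > m := fun hc => h (le_of_lt hc)
      simp [rcbgThs, rcbgGo, h, h', ih]

-- ===== VERDICT (by name: the statement is the Claim_ definition above) =====
theorem return_cities_by_genre_spec : Claim_equal_return_cities_by_genre := by
  intro data _
  unfold Spec_return_cities_by_genre return_cities_by_genre return_cities_by_genre_alt rcbg_thresholds
  rw [rcbg_foldA, rcbg_foldB]
  simp [rcbg_zip_filter]
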